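-- pv_equiv track=rewrite | github.com/arifkhan1990/Competitive-Programming | Codingninjas/String/Match-Specific-Pattern.py | matchSpecificPattern
-- ===== SOURCE A (Python) =====
-- def matchSpecificPattern(words, n, pattern):
--     res = []
--
--     for s in words:
--         if len(s) == len(pattern) and len(set(s)) == len(set(pattern)):
--             ans = {}
--             b = 1
--             for i, j in zip(pattern, s):
--                 if ans.get(i):
--                     if ans[i] != j:
--                         b = 0
--                         break
--                 else:
--                     ans[i] = j
--
--             if b == 1:
--                 res.append(s)
--
--     return res
-- ===== SOURCE B (Python) =====
-- def _signature(s):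
--     # canonical isomorphism signature: each char mapped to its first-occurrence index
--     return [s.index(c) for c in s]
--
--
-- def matchSpecificPattern(words, n, pattern):
--     psig = _signature(pattern)
--     plen = len(pattern)
--     return [w for w in words if len(w) == plen and _signature(w) == psig]
-- ===== Notes on version B (the rewrite author's own statement) =====
-- stated objective: simpler
-- what changed: B maps each word (and the pattern) to a canonical first-occurrence-index signature and keeps words whose signature equals the pattern's, replacing A's per-word mapping-dict-with-consistency-flag plus distinct-character-count guard with a single normalize-and-compare.
import Mathlib
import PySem

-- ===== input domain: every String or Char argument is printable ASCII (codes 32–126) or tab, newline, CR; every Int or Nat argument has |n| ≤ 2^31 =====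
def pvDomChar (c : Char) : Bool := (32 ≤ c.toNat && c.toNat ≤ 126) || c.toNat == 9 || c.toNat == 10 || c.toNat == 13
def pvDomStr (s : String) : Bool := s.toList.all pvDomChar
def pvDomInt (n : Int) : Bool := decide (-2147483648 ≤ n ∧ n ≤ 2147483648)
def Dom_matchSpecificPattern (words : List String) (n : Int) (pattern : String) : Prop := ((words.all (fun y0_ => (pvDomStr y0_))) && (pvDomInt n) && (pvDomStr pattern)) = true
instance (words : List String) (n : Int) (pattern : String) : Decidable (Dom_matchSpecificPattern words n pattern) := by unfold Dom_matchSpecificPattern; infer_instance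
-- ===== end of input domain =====

-- B replaces A's per-word mapping-dict + consistency-flag + distinct-count guard with a
-- canonical first-occurrence-index signature computed per string and compared with the
-- pattern's (objective: simpler).

-- ===== PORT A =====
-- inner 'for i, j in zip(pattern, s)' loop with the b-flag and break;
-- 'if ans.get(i):' — values are single characters, always truthy in Python, so this is a presence test
def pvALoop : List (Char × Char) → PySem.Dict Char Char → Bool
  | [], _ => true
  | (i, j) :: rest, ans =>
    match ans.get? i with
    | some v => if v ≠ j then false else pvALoop rest ans
    | none => pvALoop rest (ans.insert i j)

def matchSpecificPattern (words : List String) (n : Int) (pattern : String) : List String :=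
  words.foldl (fun res s =>
    if PySem.Str.len s = PySem.Str.len pattern then
      if (PySem.Set.len (PySem.Set.ofList s.toList) : Int)
          = PySem.Set.len (PySem.Set.ofList pattern.toList) then
        if pvALoop (pattern.toList.zip s.toList) PySem.Dict.empty then res ++ [s] else res
      else res
    else res) []

-- ===== PORT B =====
-- _signature(s) = [s.index(c) for c in s]; c always occurs in s, so s.index never raises
-- (index? is always 'some' here; the getD 0 default is unreachable)
def pvSig (s : List Char) : List Int :=
  s.map (fun c => ((PySem.List.index? s c).getD 0 : Int))

def matchSpecificPattern_alt (words : List String) (n : Int) (pattern : String) : List String :=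
  let psig := pvSig pattern.toList
  let plen := PySem.Str.len pattern
  words.filter (fun w => PySem.Str.len w = plen ∧ pvSig w.toList = psig)

-- ===== PRECONDITION & SPEC =====
def Spec_matchSpecificPattern (words : List String) (n : Int) (pattern : String) (out : List String) : Prop := out = matchSpecificPattern_alt words n pattern
instance (words : List String) (n : Int) (pattern : String) (out : List String) : Decidable (Spec_matchSpecificPattern words n pattern out) := by unfold Spec_matchSpecificPattern; infer_instance

-- ===== CLAIM (what is proved, stated in full; the proofs are below) =====
def Claim_equal_matchSpecificPattern : Prop := ∀ (words : List String) (n : Int) (pattern : String), Dom_matchSpecificPattern words n pattern → Spec_matchSpecificPattern words n pattern (matchSpecificPattern words n pattern)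

-- ===== LEMMAS AND PROOFS =====

-- index? on a member is 'some idxOf'
theorem pv_index?_mem {s : List Char} {c : Char} (h : c ∈ s) :
    PySem.List.index? s c = some (s.idxOf c) := by
  induction s with
  | nil => cases h
  | cons x xs ih =>
    by_cases hx : x = c
    · subst hx
      rw [PySem.List.index?_cons_self, List.idxOf_cons_self]
    · rcases List.mem_cons.mp h with h1 | h1
      · exact absurd h1.symm hx
      · rw [PySem.List.index?_cons_of_ne _ hx, ih h1, List.idxOf_cons_ne _ hx]
        rfl

theorem pv_sig_eq_map_idxOf (s : List Char) :
    pvSig s = s.map (fun c => (s.idxOf c : Int)) := by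
  unfold pvSig
  apply List.map_congr_left
  intro c hc
  rw [pv_index?_mem hc]
  rfl

-- characterization of A's inner loop: 'look' = dict first, then first match in the pairs
theorem pv_lookup_cons_ne {β : Type} {k i : Char} (j : β) (rest : List (Char × β)) (h : k ≠ i) :
    List.lookup k ((i, j) :: rest) = List.lookup k rest := by
  simp [List.lookup, beq_eq_false_iff_ne.mpr, h]

theorem pv_aLoop_iff (zs : List (Char × Char)) (d : PySem.Dict Char Char) :
    pvALoop zs d = true ↔
      ∀ pr ∈ zs, ((d.get? pr.1).or (List.lookup pr.1 zs)) = some pr.2 := by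
  induction zs generalizing d with
  | nil => simp [pvALoop]
  | cons hd rest ih =>
    obtain ⟨i, j⟩ := hd
    show pvALoop ((i, j) :: rest) d = true ↔ _
    unfold pvALoop
    cases hget : d.get? i with
    | some v =>
      change (if v ≠ j then false else pvALoop rest d) = true ↔ _
      by_cases hv : v = j
      · subst hv
        rw [if_neg (fun h => h rfl)]
        rw [ih d]
        constructor
        · intro h pr hpr
          rcases List.mem_cons.mp hpr with h1 | h1
          · subst h1; simp [hget]
          · have := h pr h1
            by_cases hpi : pr.1 = i
            · rw [hpi, hget] at this ⊢; simpa using this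
            · rw [pv_lookup_cons_ne _ _ hpi]; exact this
        · intro h pr hpr
          have := h pr (List.mem_cons_of_mem _ hpr)
          by_cases hpi : pr.1 = i
          · rw [hpi, hget] at this ⊢; simpa using this
          · rwa [pv_lookup_cons_ne _ _ hpi] at this
      · rw [if_pos hv]
        constructor
        · intro h; exact absurd h (by simp)
        · intro h
          have := h (i, j) List.mem_cons_self
          rw [hget] at this
          simp at this
          exact absurd this hv
    | none =>
      change pvALoop rest (d.insert i j) = true ↔ _
      rw [ih (d.insert i j)]
      constructor
      · intro h pr hpr
        rcases List.mem_cons.mp hpr with h1 | h1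
        · subst h1
          simp [hget, List.lookup_cons_self]
        · have := h pr h1
          by_cases hpi : pr.1 = i
          · rw [hpi] at this ⊢
            rw [PySem.Dict.get?_insert_self] at this
            rw [hget, Option.none_or, List.lookup_cons_self]
            simpa using this
          · rw [PySem.Dict.get?_insert_of_ne _ _ hpi] at this
            rwa [pv_lookup_cons_ne _ _ hpi]
      · intro h pr hpr
        have := h pr (List.mem_cons_of_mem _ hpr)
        by_cases hpi : pr.1 = i
        · rw [hpi] at this ⊢
          rw [hget, Option.none_or, List.lookup_cons_self] at this
          rw [PySem.Dict.get?_insert_self]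
          simpa using this
        · rw [pv_lookup_cons_ne _ _ hpi] at this
          rwa [PySem.Dict.get?_insert_of_ne _ _ hpi]

-- lookup of p[k] in zip p s is s at the first occurrence of p[k] in p
theorem pv_lookup_zip {p s : List Char} (hlen : p.length ≤ s.length) {c : Char} (hc : c ∈ p) :
    List.lookup c (p.zip s) = s[p.idxOf c]? := by
  induction p generalizing s with
  | nil => cases hc
  | cons a p' ih =>
    cases s with
    | nil => simp at hlen
    | cons b s' =>
      by_cases hca : c = a
      · subst hca
        simp [List.zip_cons_cons, List.lookup_cons_self, List.idxOf_cons_self]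
      · rcases List.mem_cons.mp hc with h1 | h1
        · exact absurd h1 hca
        · have hl : p'.length ≤ s'.length := by simpa using hlen
          rw [List.zip_cons_cons, pv_lookup_cons_ne _ _ hca, ih hl h1,
            List.idxOf_cons_ne _ (fun h => hca h.symm)]
          simp

-- ofList commutes with map for a function injective on the list
theorem pv_ofList_map {α β : Type} [DecidableEq α] [DecidableEq β] (f : α → β) (l : List α)
    (hinj : ∀ a ∈ l, ∀ b ∈ l, f a = f b → a = b) :
    PySem.Set.ofList (l.map f) = (PySem.Set.ofList l).map f := by
  induction l using List.reverseRecOn with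
  | nil => rfl
  | append_singleton l x ih =>
    have hinj' : ∀ a ∈ l, ∀ b ∈ l, f a = f b → a = b := fun a ha b hb =>
      hinj a (List.mem_append_left _ ha) b (List.mem_append_left _ hb)
    rw [List.map_append, List.map_singleton, PySem.Set.ofList_append_singleton,
      PySem.Set.ofList_append_singleton, ih hinj']
    by_cases hx : x ∈ PySem.Set.ofList l
    · rw [PySem.Set.add_of_mem hx, PySem.Set.add_of_mem (List.mem_map_of_mem hx)]
    · rw [PySem.Set.add_of_not_mem hx, PySem.Set.add_of_not_mem ?_, List.map_append,
        List.map_singleton]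
      intro hmem
      rcases List.mem_map.mp hmem with ⟨a, ha, hfa⟩
      have ha' : a ∈ l := (PySem.Set.mem_ofList _ _).mp ha
      have hx' : x ∈ l ++ [x] := List.mem_append_right _ (List.mem_singleton_self x)
      exact hx ((PySem.Set.mem_ofList _ _).mpr
        (hinj a (List.mem_append_left _ ha') x hx' hfa ▸ ha') )

theorem pv_ofList_map_len_le {α β : Type} [DecidableEq α] [DecidableEq β] (f : α → β) (l : List α) :
    (PySem.Set.ofList (l.map f)).length ≤ (PySem.Set.ofList l).length := by
  induction l using List.reverseRecOn with
  | nil => simp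
  | append_singleton l x ih =>
    rw [List.map_append, List.map_singleton, PySem.Set.ofList_append_singleton,
      PySem.Set.ofList_append_singleton]
    by_cases hx : x ∈ PySem.Set.ofList l
    · rw [PySem.Set.add_of_mem hx]
      by_cases hfx : f x ∈ PySem.Set.ofList (l.map f)
      · rw [PySem.Set.add_of_mem hfx]; exact ih
      · exact absurd ((PySem.Set.mem_ofList _ _).mpr
          (List.mem_map_of_mem ((PySem.Set.mem_ofList _ _).mp hx))) hfx
    · rw [PySem.Set.add_of_not_mem hx, List.length_append]
      by_cases hfx : f x ∈ PySem.Set.ofList (l.map f)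
      · rw [PySem.Set.add_of_mem hfx]; omega
      · rw [PySem.Set.add_of_not_mem hfx, List.length_append]; simpa using ih

-- equal distinct counts of l and its image force injectivity on l
theorem pv_inj_of_len_eq {α β : Type} [DecidableEq α] [DecidableEq β] (f : α → β) (l : List α)
    (hlen : (PySem.Set.ofList (l.map f)).length = (PySem.Set.ofList l).length) :
    ∀ a ∈ l, ∀ b ∈ l, f a = f b → a = b := by
  induction l using List.reverseRecOn with
  | nil => intro a ha; cases ha
  | append_singleton l x ih =>
    rw [List.map_append, List.map_singleton, PySem.Set.ofList_append_singleton,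
      PySem.Set.ofList_append_singleton] at hlen
    -- compare the two possible increments
    have hmono : (PySem.Set.ofList (l.map f)).length ≤ (PySem.Set.ofList l).length :=
      pv_ofList_map_len_le f l
    have himp : x ∈ PySem.Set.ofList l → f x ∈ PySem.Set.ofList (l.map f) := fun hx =>
      (PySem.Set.mem_ofList _ _).mpr (List.mem_map_of_mem ((PySem.Set.mem_ofList _ _).mp hx))
    have hcases : (PySem.Set.ofList (l.map f)).length = (PySem.Set.ofList l).length ∧
        (x ∉ PySem.Set.ofList l → f x ∉ PySem.Set.ofList (l.map f)) := by
      by_cases hx : x ∈ PySem.Set.ofList l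
      · rw [PySem.Set.add_of_mem hx, PySem.Set.add_of_mem (himp hx)] at hlen
        exact ⟨hlen, fun h => absurd hx h⟩
      · rw [PySem.Set.add_of_not_mem hx, List.length_append, List.length_singleton] at hlen
        by_cases hfx : f x ∈ PySem.Set.ofList (l.map f)
        · rw [PySem.Set.add_of_mem hfx] at hlen
          exfalso; omega
        · rw [PySem.Set.add_of_not_mem hfx, List.length_append, List.length_singleton] at hlen
          exact ⟨by omega, fun _ => hfx⟩
    have ihl := ih hcases.1
    have hnew : x ∉ l → ∀ a ∈ l, f a ≠ f x := by
      intro hx a ha hfa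
      have hx' : x ∉ PySem.Set.ofList l := fun h => hx ((PySem.Set.mem_ofList _ _).mp h)
      exact hcases.2 hx' ((PySem.Set.mem_ofList _ _).mpr (hfa ▸ List.mem_map_of_mem ha))
    intro a ha b hb hfab
    rcases List.mem_append.mp ha with ha1 | ha1 <;> rcases List.mem_append.mp hb with hb1 | hb1
    · exact ihl a ha1 b hb1 hfab
    · rw [List.mem_singleton.mp hb1] at hfab ⊢
      by_cases hx : x ∈ l
      · exact ihl a ha1 x hx hfab
      · exact absurd hfab (hnew hx a ha1)
    · rw [List.mem_singleton.mp ha1] at hfab ⊢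
      by_cases hx : x ∈ l
      · exact (ihl b hb1 x hx hfab.symm).symm
      · exact absurd hfab.symm (hnew hx b hb1)
    · rw [List.mem_singleton.mp ha1, List.mem_singleton.mp hb1]

theorem pv_idxOf_map {α β : Type} [DecidableEq α] [DecidableEq β] (f : α → β) (l : List α)
    (hinj : ∀ a ∈ l, ∀ b ∈ l, f a = f b → a = b) {c : α} (hc : c ∈ l) :
    (l.map f).idxOf (f c) = l.idxOf c := by
  induction l with
  | nil => cases hc
  | cons a l' ih =>
    by_cases hca : a = c
    · subst hca
      simp [List.idxOf_cons_self]
    · have hc' : c ∈ l' := by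
        rcases List.mem_cons.mp hc with h1 | h1
        · exact absurd h1.symm hca
        · exact h1
      have hfne : f a ≠ f c := fun h =>
        hca (hinj a List.mem_cons_self c hc h)
      rw [List.map_cons, List.idxOf_cons_ne _ hfne, List.idxOf_cons_ne _ hca,
        ih (fun x hx y hy => hinj x (List.mem_cons_of_mem _ hx) y (List.mem_cons_of_mem _ hy)) hc']

theorem pv_idxOf_of_map {α β : Type} [DecidableEq α] [DecidableEq β] (F : α → β)
    (p : List α) (s : List β) (hsF : s = p.map F)
    (hinj : ∀ a ∈ p, ∀ b ∈ p, F a = F b → a = b)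
    (k : ℕ) (hk : k < p.length) (hks : k < s.length) :
    List.idxOf (s[k]'hks) s = List.idxOf (p[k]'hk) p := by
  subst hsF
  simp only [List.getElem_map]
  exact pv_idxOf_map F p hinj (List.getElem_mem hk)

-- the per-word equivalence
theorem pv_key (p s : List Char) (hlen : s.length = p.length) :
    (((PySem.Set.ofList s).length = (PySem.Set.ofList p).length) ∧
      pvALoop (p.zip s) PySem.Dict.empty = true) ↔ pvSig s = pvSig p := by
  have hsl : ∀ {k : ℕ}, k < p.length → k < s.length := fun hk => hlen ▸ hk
  have hidx : ∀ {k : ℕ} (hk : k < p.length), List.idxOf (p[k]'hk) p < p.length :=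
    fun hk => List.idxOf_lt_length_of_mem (List.getElem_mem hk)
  have hA : pvALoop (p.zip s) PySem.Dict.empty = true ↔
      ∀ (k : ℕ) (hk : k < p.length),
        s[List.idxOf (p[k]'hk) p]'(hsl (hidx hk)) = s[k]'(hsl hk) := by
    rw [pv_aLoop_iff]
    simp only [PySem.Dict.get?_empty, Option.none_or]
    constructor
    · intro h k hk
      have hkz : k < (p.zip s).length := by
        rw [List.length_zip]; omega
      have hmem : (p[k]'hk, s[k]'(hsl hk)) ∈ p.zip s := by
        rw [← List.getElem_zip (h := hkz)]
        exact List.getElem_mem hkz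
      have hres := h _ hmem
      rw [pv_lookup_zip (le_of_eq hlen.symm) (List.getElem_mem hk),
        List.getElem?_eq_getElem (hsl (hidx hk))] at hres
      exact Option.some.inj hres
    · intro h pr hpr
      rcases List.mem_iff_getElem.mp hpr with ⟨k, hkz, hpr_eq⟩
      have hk : k < p.length := by
        rw [List.length_zip] at hkz; omega
      rw [← hpr_eq, List.getElem_zip]
      rw [pv_lookup_zip (le_of_eq hlen.symm) (List.getElem_mem hk),
        List.getElem?_eq_getElem (hsl (hidx hk))]
      exact congrArg some (h k hk)
  have hB : pvSig s = pvSig p ↔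
      ∀ (k : ℕ) (hk : k < p.length),
        List.idxOf (s[k]'(hsl hk)) s = List.idxOf (p[k]'hk) p := by
    rw [pv_sig_eq_map_idxOf, pv_sig_eq_map_idxOf]
    constructor
    · intro h k hk
      have h2 := List.getElem_of_eq h (by simpa using hsl hk)
      simp only [List.getElem_map] at h2
      have h3 : ((List.idxOf (s[k]'(hsl hk)) s : ℕ) : Int)
          = ((List.idxOf (p[k]'hk) p : ℕ) : Int) := by simpa using h2
      exact_mod_cast h3
    · intro h
      apply List.ext_getElem (by simp [hlen])
      intro k h1 h2
      simp only [List.getElem_map]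
      have hk : k < p.length := by simpa using h2
      exact_mod_cast h k hk
  rw [hA, hB]
  constructor
  · rintro ⟨hset, haloop⟩
    intro k hk
    -- the mapping induced by the consistency loop
    have hsF : s = p.map (fun c => s.getD (List.idxOf c p) 'a') := by
      apply List.ext_getElem (by simp [hlen])
      intro m h1 h2
      have hm : m < p.length := by simpa using h2
      simp only [List.getElem_map]
      rw [List.getD_eq_getElem _ _ (hsl (hidx hm))]
      exact (haloop m hm).symm
    have hlen2 : (PySem.Set.ofList (p.map (fun c => s.getD (List.idxOf c p) 'a'))).length
        = (PySem.Set.ofList p).length := by rw [← hsF]; exact hset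
    have hinj := pv_inj_of_len_eq _ p hlen2
    exact pv_idxOf_of_map _ p s hsF hinj k hk (hsl hk)
  · intro hsig
    refine ⟨?_, ?_⟩
    · have hmap : s.map (fun c => (List.idxOf c s : Int)) = p.map (fun c => (List.idxOf c p : Int)) := by
        rw [← pv_sig_eq_map_idxOf, ← pv_sig_eq_map_idxOf]
        rw [hB]
        exact hsig
      have hfi : ∀ a ∈ s, ∀ b ∈ s, (List.idxOf a s : Int) = (List.idxOf b s : Int) → a = b := by
        intro a ha b hb hab
        have hab' : List.idxOf a s = List.idxOf b s := by exact_mod_cast hab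
        have h1 := List.getElem_idxOf (List.idxOf_lt_length_of_mem ha)
        have h2 := List.getElem_idxOf (List.idxOf_lt_length_of_mem hb)
        rw [← h1, ← h2]
        congr 1
      have hgi : ∀ a ∈ p, ∀ b ∈ p, (List.idxOf a p : Int) = (List.idxOf b p : Int) → a = b := by
        intro a ha b hb hab
        have hab' : List.idxOf a p = List.idxOf b p := by exact_mod_cast hab
        have h1 := List.getElem_idxOf (List.idxOf_lt_length_of_mem ha)
        have h2 := List.getElem_idxOf (List.idxOf_lt_length_of_mem hb)
        rw [← h1, ← h2]
        congr 1
      have e1 := pv_ofList_map (fun c => (List.idxOf c s : Int)) s hfi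
      have e2 := pv_ofList_map (fun c => (List.idxOf c p : Int)) p hgi
      have l1 := congrArg List.length e1
      have l2 := congrArg List.length e2
      rw [hmap] at l1
      rw [List.length_map] at l1 l2
      omega
    · intro k hk
      have hkk := hsig k hk
      have hbound : List.idxOf (s[k]'(hsl hk)) s < s.length :=
        List.idxOf_lt_length_of_mem (List.getElem_mem (hsl hk))
      have hself := List.getElem_idxOf hbound
      simp only [hkk] at hself
      exact hself

-- the per-word acceptance conditions of the two programs agree
theorem pv_cond (pattern w : String) :
    (PySem.Str.len w = PySem.Str.len pattern ∧
      ((PySem.Set.len (PySem.Set.ofList w.toList) : Int)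
          = PySem.Set.len (PySem.Set.ofList pattern.toList) ∧
        pvALoop (pattern.toList.zip w.toList) PySem.Dict.empty = true))
    ↔ (PySem.Str.len w = PySem.Str.len pattern ∧ pvSig w.toList = pvSig pattern.toList) := by
  have hlen : PySem.Str.len w = PySem.Str.len pattern ↔ w.toList.length = pattern.toList.length := by
    unfold PySem.Str.len
    exact Int.natCast_inj
  have hset : ((PySem.Set.len (PySem.Set.ofList w.toList) : Int)
      = PySem.Set.len (PySem.Set.ofList pattern.toList))
      ↔ (PySem.Set.ofList w.toList).length = (PySem.Set.ofList pattern.toList).length := by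
    unfold PySem.Set.len
    exact Int.natCast_inj
  constructor
  · rintro ⟨h1, h2, h3⟩
    exact ⟨h1, (pv_key pattern.toList w.toList (hlen.mp h1)).mp ⟨hset.mp h2, h3⟩⟩
  · rintro ⟨h1, h2⟩
    have := (pv_key pattern.toList w.toList (hlen.mp h1)).mpr h2
    exact ⟨h1, hset.mpr this.1, this.2⟩

-- ===== VERDICT (by name: the statement is the Claim_ definition above) =====
theorem matchSpecificPattern_spec : Claim_equal_matchSpecificPattern := by
  intro words n pattern _
  unfold Spec_matchSpecificPattern matchSpecificPattern matchSpecificPattern_alt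
  simp only [← ite_and]
  rw [PySem.List.foldl_append_ite_eq_filter, List.nil_append]
  apply List.filter_congr
  intro w _
  simp only [decide_eq_decide]
  exact pv_cond pattern w
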